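-- pv_equiv track=rewrite | github.com/zyd16888/subtitlegeneration | backend/tgbot/handlers/admin.py | _parse_broadcast_args
-- ===== SOURCE A (Python) =====
-- def _parse_broadcast_args(args: list[str]) -> tuple[str, str]:
--     """解析广播 flag，返回 (filter_kind, message)。"""
--     filter_kind = "active-7d"
--     msg_parts = []
--     for token in args:
--         low = token.lower()
--         if low in ("--active-7d", "--active7d"):
--             filter_kind = "active-7d"
--         elif low == "--bound":
--             filter_kind = "bound"
--         elif low == "--admins":
--             filter_kind = "admins"
--         elif low == "--all":
--             filter_kind = "all"
--         else:
--             msg_parts.append(token)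
--     return filter_kind, " ".join(msg_parts).strip()
-- ===== SOURCE B (Python) =====
-- _FLAGS = {
--     "--active-7d": "active-7d",
--     "--active7d": "active-7d",
--     "--bound": "bound",
--     "--admins": "admins",
--     "--all": "all",
-- }
--
--
-- def _parse_broadcast_args(args: list[str]) -> tuple[str, str]:
--     # pass 1: scan back-to-front and stop at the first flag seen (= last flag wins)
--     filter_kind = "active-7d"
--     for token in reversed(args):
--         k = _FLAGS.get(token.lower())
--         if k is not None:
--             filter_kind = k
--             break
--     # pass 2: independent pass joining the non-flag tokens
--     message = " ".join(t for t in args if t.lower() not in _FLAGS).strip()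
--     return filter_kind, message
-- ===== Notes on version B (the rewrite author's own statement) =====
-- stated objective: alternative
-- what changed: Replaces A's single forward loop threading (filter_kind, msg_parts) through an if/elif chain by two staged passes over a flag map: a reversed scan that stops at the first flag found from the end (last-flag-wins with early exit) and a separate pass joining the non-flag tokens.
import Mathlib
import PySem

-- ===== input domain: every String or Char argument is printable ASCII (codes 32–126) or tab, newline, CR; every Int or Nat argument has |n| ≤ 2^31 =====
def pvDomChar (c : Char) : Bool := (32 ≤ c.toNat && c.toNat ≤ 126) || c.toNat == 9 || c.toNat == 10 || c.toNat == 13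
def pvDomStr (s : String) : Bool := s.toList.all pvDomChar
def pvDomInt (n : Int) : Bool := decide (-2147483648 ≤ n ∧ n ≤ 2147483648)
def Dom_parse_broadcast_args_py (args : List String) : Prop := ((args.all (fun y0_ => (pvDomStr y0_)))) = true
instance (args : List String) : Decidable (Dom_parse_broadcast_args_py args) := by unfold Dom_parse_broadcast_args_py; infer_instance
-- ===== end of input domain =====

-- B replaces A's single state-threading forward loop by two staged passes:
-- a reversed scan with early exit for the flag, and a separate pass joining the
-- non-flag tokens (alternative decomposition, same cost).

-- ===== PORT A =====
-- loop body of A's for-loop: state = (filter_kind, msg_parts)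
def pvStepA (st : String × List String) (token : String) : String × List String :=
  let low := PySem.Str.lower token
  if low = "--active-7d" ∨ low = "--active7d" then ("active-7d", st.2)
  else if low = "--bound" then ("bound", st.2)
  else if low = "--admins" then ("admins", st.2)
  else if low = "--all" then ("all", st.2)
  else (st.1, st.2 ++ [token])

def parse_broadcast_args_py (args : List String) : String × String :=
  let st := args.foldl pvStepA ("active-7d", [])
  (st.1, PySem.Str.strip (PySem.Str.join " " st.2))

-- ===== PORT B =====
def pvFlags : PySem.Dict String String :=
  PySem.Dict.ofList [("--active-7d", "active-7d"), ("--active7d", "active-7d"),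
                     ("--bound", "bound"), ("--admins", "admins"), ("--all", "all")]

-- pass 1: 'for token in reversed(args): … break' = recursion over args.reverse stopping at the first hit
def pvKindRev : List String → String
  | [] => "active-7d"
  | t :: ts =>
    match pvFlags.get? (PySem.Str.lower t) with
    | some k => k
    | none => pvKindRev ts

def parse_broadcast_args_py_alt (args : List String) : String × String :=
  (pvKindRev args.reverse,
   PySem.Str.strip (PySem.Str.join " "
     (args.filter (fun t => (pvFlags.get? (PySem.Str.lower t)).isNone))))

-- ===== PRECONDITION & SPEC =====
def Spec_parse_broadcast_args_py (args : List String) (out : String × String) : Prop := out = parse_broadcast_args_py_alt args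
instance (args : List String) (out : String × String) : Decidable (Spec_parse_broadcast_args_py args out) := by unfold Spec_parse_broadcast_args_py; infer_instance

-- ===== CLAIM (what is proved, stated in full; the proofs are below) =====
def Claim_equal_parse_broadcast_args_py : Prop := ∀ (args : List String), Dom_parse_broadcast_args_py args → Spec_parse_broadcast_args_py args (parse_broadcast_args_py args)

-- ===== LEMMAS AND PROOFS =====

-- the literal dict's lookup as a plain if-chain
theorem pv_get (s : String) : pvFlags.get? s =
    (if s = "--active-7d" then some "active-7d"
     else if s = "--active7d" then some "active-7d"
     else if s = "--bound" then some "bound"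
     else if s = "--admins" then some "admins"
     else if s = "--all" then some "all"
     else none) := by
  have h : pvFlags = PySem.Dict.mk [("--active-7d", "active-7d"), ("--active7d", "active-7d"),
      ("--bound", "bound"), ("--admins", "admins"), ("--all", "all")] := by decide
  rw [h]
  by_cases h1 : s = "--active-7d" <;>
  by_cases h2 : s = "--active7d" <;>
  by_cases h3 : s = "--bound" <;>
  by_cases h4 : s = "--admins" <;>
  by_cases h5 : s = "--all" <;>
    simp_all [PySem.Dict.get?_mk_cons, PySem.Dict.get?] <;>
    exact ⟨fun e => h1 e.symm, fun e => h2 e.symm, fun e => h3 e.symm,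
           fun e => h4 e.symm, fun e => h5 e.symm⟩

-- A's loop body, expressed through the dict lookup
theorem pv_step_eq (st : String × List String) (t : String) :
    pvStepA st t = (match pvFlags.get? (PySem.Str.lower t) with
      | some v => (v, st.2)
      | none => (st.1, st.2 ++ [t])) := by
  unfold pvStepA
  rw [pv_get]
  by_cases h1 : PySem.Str.lower t = "--active-7d" <;>
  by_cases h2 : PySem.Str.lower t = "--active7d" <;>
  by_cases h3 : PySem.Str.lower t = "--bound" <;>
  by_cases h4 : PySem.Str.lower t = "--admins" <;>
  by_cases h5 : PySem.Str.lower t = "--all" <;>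
    simp_all

-- A's loop computes (last matched kind, parts ++ non-flag tokens)
theorem pv_loop_eq (args : List String) (k : String) (parts : List String) :
    args.foldl pvStepA (k, parts)
      = ((args.filterMap (fun t => pvFlags.get? (PySem.Str.lower t))).foldl (fun _ v => v) k,
         parts ++ args.filter (fun t => (pvFlags.get? (PySem.Str.lower t)).isNone)) := by
  induction args generalizing k parts with
  | nil => simp
  | cons t ts ih =>
    simp only [List.foldl, List.filterMap, List.filter]
    rw [pv_step_eq]
    cases hv : pvFlags.get? (PySem.Str.lower t) with
    | none => simp [ih]
    | some v => simp [ih]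

-- B's back-to-front recursion = head of the reversed match list
theorem pv_kindRev_eq (l : List String) :
    pvKindRev l = ((l.filterMap (fun t => pvFlags.get? (PySem.Str.lower t))).head?).getD "active-7d" := by
  induction l with
  | nil => rfl
  | cons t ts ih =>
    simp only [pvKindRev, List.filterMap]
    cases hv : pvFlags.get? (PySem.Str.lower t) with
    | none => simpa using ih
    | some v => simp

-- last-wins fold equals getLast?.getD
theorem pv_last_foldl (l : List String) (k : String) :
    l.foldl (fun _ v => v) k = l.getLast?.getD k := by
  induction l generalizing k with
  | nil => rfl
  | cons t ts ih =>
    cases ts with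
    | nil => simp [List.foldl]
    | cons u us =>
      simp only [List.foldl, List.getLast?_cons_cons]
      exact ih t

-- ===== VERDICT (by name: the statement is the Claim_ definition above) =====
theorem parse_broadcast_args_py_spec : Claim_equal_parse_broadcast_args_py := by
  intro args _
  unfold Spec_parse_broadcast_args_py parse_broadcast_args_py parse_broadcast_args_py_alt
  rw [pv_loop_eq, pv_last_foldl, pv_kindRev_eq]
  simp [List.filterMap_reverse, List.head?_reverse]
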